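-- pv_equiv track=rewrite | github.com/Amitesh12-bot/BIS-TAGSET-OF-MAGAHI- | # Magahi NER using BIS Tagset (Rule-Base).py | tag_phrases
-- ===== SOURCE A (Python) =====
-- def tag_phrases(words, phrase_list, tag):
--     """Mark phrase positions so single-word loop can skip them."""
--     tagged = {}
--     text_joined = " ".join(words)
--     for phrase in sorted(phrase_list, key=len, reverse=True):   # longest match first
--         phrase_lower = phrase.lower()
--         phrase_words = phrase_lower.split()
--         plen = len(phrase_words)
--         for i in range(len(words) - plen + 1):
--             if words[i:i+plen] == phrase_words and i not in tagged:
--                 for j in range(i, i + plen):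
--                     tagged[j] = (words[j], tag) if j > i else (phrase, tag)
--     return tagged
-- ===== SOURCE B (Python) =====
-- def tag_phrases(words, phrase_list, tag):
--     """Mark phrase positions so single-word loop can skip them.
--
--     One hash index of word-tuples per distinct phrase length replaces the
--     per-phrase scan over all positions."""
--     tagged = {}
--     index = {}  # phrase word-count -> {word tuple -> [start positions, ascending]}
--     for phrase in sorted(phrase_list, key=len, reverse=True):
--         phrase_words = phrase.lower().split()
--         plen = len(phrase_words)
--         if not phrase_words:
--             continue  # an empty/whitespace phrase can never tag anything
--         if plen not in index:
--             idx = {}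
--             for i in range(len(words) - plen + 1):
--                 idx.setdefault(tuple(words[i:i + plen]), []).append(i)
--             index[plen] = idx
--         for i in index[plen].get(tuple(phrase_words), ()):
--             if i not in tagged:
--                 tagged[i] = (phrase, tag)
--                 for j in range(i + 1, i + plen):
--                     tagged[j] = (words[j], tag)
--     return tagged
-- ===== Notes on version B (the rewrite author's own statement) =====
-- stated objective: faster
-- what changed: Instead of scanning every start position for every phrase, B builds one hash index (word-tuple -> ascending start positions) per distinct phrase length and looks each phrase up in it; empty/whitespace phrases, which can never tag anything, are skipped.
import Mathlib
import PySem

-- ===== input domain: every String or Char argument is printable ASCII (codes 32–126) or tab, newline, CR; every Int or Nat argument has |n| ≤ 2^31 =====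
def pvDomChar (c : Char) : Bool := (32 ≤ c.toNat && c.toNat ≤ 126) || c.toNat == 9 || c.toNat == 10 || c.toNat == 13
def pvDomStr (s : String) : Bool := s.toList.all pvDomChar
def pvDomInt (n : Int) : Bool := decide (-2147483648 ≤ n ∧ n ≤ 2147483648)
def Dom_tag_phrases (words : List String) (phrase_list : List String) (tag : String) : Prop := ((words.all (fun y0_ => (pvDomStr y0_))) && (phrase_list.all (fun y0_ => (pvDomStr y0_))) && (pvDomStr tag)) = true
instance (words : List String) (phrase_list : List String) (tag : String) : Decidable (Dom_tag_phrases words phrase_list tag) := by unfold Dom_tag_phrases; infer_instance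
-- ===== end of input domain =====

-- B replaces A's per-phrase scan over every start position by one hash index
-- (word-tuple -> ascending start positions) built per distinct phrase length;
-- objective: faster (O(P·N·L) -> O(D·N·L + total phrase size)).

-- ===== PORT A =====
def tag_phrases (words : List String) (phrase_list : List String) (tag : String) : List (Int × String × String) :=
  let tagged : PySem.Dict Int (String × String) := PySem.Dict.empty
  let _text_joined := PySem.Str.join " " words   -- computed and never used, as in A
  let tagged :=
    (PySem.List.sorted phrase_list (fun p => PySem.Str.len p) true).foldl
      (fun tagged phrase =>
        let phrase_words := PySem.Str.split₀ (PySem.Str.lower phrase)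
        let plen : Int := phrase_words.length
        (PySem.List.pyRange 0 ((words.length : Int) - plen + 1) 1).foldl
          (fun tagged i =>
            if PySem.List.slice words (some i) (some (i + plen)) = phrase_words ∧
               tagged.contains i = false then
              (PySem.List.pyRange i (i + plen) 1).foldl
                (fun tagged j =>
                  -- words[j]: j is always in range here, so the default is never used
                  tagged.insert j (if j > i then ((PySem.List.pyGet? words j).getD "", tag)
                                   else (phrase, tag)))
                tagged
            else tagged)
          tagged)
      tagged
  tagged.items

-- ===== PORT B =====
-- the per-length index: word tuple (slice of `words`) -> ascending start positions;
-- `idx.setdefault(key, []).append(i)` is `idx.modify key [] (· ++ [i])` (same value, same key order)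
def pvBuildIdx (words : List String) (plen : Int) : PySem.Dict (List String) (List Int) :=
  (PySem.List.pyRange 0 ((words.length : Int) - plen + 1) 1).foldl
    (fun idx i => idx.modify (PySem.List.slice words (some i) (some (i + plen))) [] (· ++ [i]))
    PySem.Dict.empty

def tag_phrases_alt (words : List String) (phrase_list : List String) (tag : String) : List (Int × String × String) :=
  let st :=
    (PySem.List.sorted phrase_list (fun p => PySem.Str.len p) true).foldl
      (fun (st : PySem.Dict Int (String × String) × PySem.Dict Int (PySem.Dict (List String) (List Int))) phrase =>
        let tagged := st.1
        let index := st.2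
        let phrase_words := PySem.Str.split₀ (PySem.Str.lower phrase)
        let plen : Int := phrase_words.length
        if phrase_words = [] then st   -- continue: an empty phrase can never tag anything
        else
          let index := if index.contains plen then index else index.insert plen (pvBuildIdx words plen)
          let positions := (index.getD plen PySem.Dict.empty).getD phrase_words []
          let tagged :=
            positions.foldl
              (fun tagged i =>
                if tagged.contains i = false then
                  (PySem.List.pyRange (i + 1) (i + plen) 1).foldl
                    (fun tagged j => tagged.insert j ((PySem.List.pyGet? words j).getD "", tag))
                    (tagged.insert i (phrase, tag))
                else tagged)
              tagged
          (tagged, index))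
      (PySem.Dict.empty, PySem.Dict.empty)
  st.1.items

-- ===== PRECONDITION & SPEC =====
def Spec_tag_phrases (words : List String) (phrase_list : List String) (tag : String) (out : List (Int × String × String)) : Prop := out = tag_phrases_alt words phrase_list tag
instance (words : List String) (phrase_list : List String) (tag : String) (out : List (Int × String × String)) : Decidable (Spec_tag_phrases words phrase_list tag out) := by unfold Spec_tag_phrases; infer_instance

-- ===== CLAIM (what is proved, stated in full; the proofs are below) =====
def Claim_equal_tag_phrases : Prop := ∀ (words : List String) (phrase_list : List String) (tag : String), Dom_tag_phrases words phrase_list tag → Spec_tag_phrases words phrase_list tag (tag_phrases words phrase_list tag)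

-- ===== LEMMAS AND PROOFS =====

-- proof-side names for the two fold bodies (definitionally the lambdas in the ports)
def pvStepA (words : List String) (tag : String)
    (tagged : PySem.Dict Int (String × String)) (phrase : String) : PySem.Dict Int (String × String) :=
  let phrase_words := PySem.Str.split₀ (PySem.Str.lower phrase)
  let plen : Int := phrase_words.length
  (PySem.List.pyRange 0 ((words.length : Int) - plen + 1) 1).foldl
    (fun tagged i =>
      if PySem.List.slice words (some i) (some (i + plen)) = phrase_words ∧
         tagged.contains i = false then
        (PySem.List.pyRange i (i + plen) 1).foldl
          (fun tagged j =>
            tagged.insert j (if j > i then ((PySem.List.pyGet? words j).getD "", tag)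
                             else (phrase, tag)))
          tagged
      else tagged)
    tagged

def pvStepB (words : List String) (tag : String)
    (st : PySem.Dict Int (String × String) × PySem.Dict Int (PySem.Dict (List String) (List Int)))
    (phrase : String) : PySem.Dict Int (String × String) × PySem.Dict Int (PySem.Dict (List String) (List Int)) :=
  let tagged := st.1
  let index := st.2
  let phrase_words := PySem.Str.split₀ (PySem.Str.lower phrase)
  let plen : Int := phrase_words.length
  if phrase_words = [] then st
  else
    let index := if index.contains plen then index else index.insert plen (pvBuildIdx words plen)
    let positions := (index.getD plen PySem.Dict.empty).getD phrase_words []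
    let tagged :=
      positions.foldl
        (fun tagged i =>
          if tagged.contains i = false then
            (PySem.List.pyRange (i + 1) (i + plen) 1).foldl
              (fun tagged j => tagged.insert j ((PySem.List.pyGet? words j).getD "", tag))
              (tagged.insert i (phrase, tag))
          else tagged)
        tagged
    (tagged, index)

-- folding a function that never changes the state
lemma pv_foldl_id {α σ : Type} (l : List α) (s : σ) (f : σ → α → σ) (h : ∀ s x, f s x = s) :
    l.foldl f s = s := by
  induction l generalizing s with
  | nil => rfl
  | cons a t ih => simp [List.foldl_cons, h, ih]

-- conditional fold = fold over the filtered list (state-independent part of the guard)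
lemma pv_foldl_filter {α σ : Type} (p : α → Prop) [DecidablePred p] (q : σ → α → Prop)
    [∀ s x, Decidable (q s x)] (g : σ → α → σ) (l : List α) (s : σ) :
    l.foldl (fun s x => if p x ∧ q s x then g s x else s) s
      = (l.filter (fun x => decide (p x))).foldl (fun s x => if q s x then g s x else s) s := by
  induction l generalizing s with
  | nil => rfl
  | cons a t ih =>
    by_cases hp : p a
    · simp [hp, ih]
    · simp [hp, ih]

-- keyed form of the library grouping lemma
lemma pv_getD_foldl_modify_key {κ β : Type} [BEq κ] [LawfulBEq κ] (l : List β) (f : β → κ)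
    (d : PySem.Dict κ (List β)) (c : κ) :
    (l.foldl (fun d x => d.modify (f x) [] (· ++ [x])) d).getD c []
      = d.getD c [] ++ l.filter (fun x => f x == c) := by
  have h := PySem.Dict.getD_foldl_modify_append (l.map (fun x => (f x, x))) d c
  simp only [List.foldl_map] at h
  simpa [List.filter_map, Function.comp_def] using h

-- the index lookup is exactly the filtered position list
lemma pvBuildIdx_getD (words : List String) (plen : Int) (key : List String) :
    (pvBuildIdx words plen).getD key []
      = (PySem.List.pyRange 0 ((words.length : Int) - plen + 1) 1).filter
          (fun i => PySem.List.slice words (some i) (some (i + plen)) == key) := by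
  unfold pvBuildIdx
  rw [pv_getD_foldl_modify_key]
  simp [PySem.Dict.getD_empty]

-- A's inner tagging loop, split at its first index
lemma pv_inner (words : List String) (tag phrase : String) (plen : Int) (hplen : 1 ≤ plen)
    (i : Int) (tagged : PySem.Dict Int (String × String)) :
    (PySem.List.pyRange i (i + plen) 1).foldl
      (fun tagged j =>
        tagged.insert j (if j > i then ((PySem.List.pyGet? words j).getD "", tag)
                         else (phrase, tag)))
      tagged
    = (PySem.List.pyRange (i + 1) (i + plen) 1).foldl
        (fun tagged j => tagged.insert j ((PySem.List.pyGet? words j).getD "", tag))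
        (tagged.insert i (phrase, tag)) := by
  rw [PySem.List.pyRange_one_cons (by omega)]
  simp only [List.foldl_cons]
  rw [if_neg (lt_irrefl i)]
  refine PySem.List.foldl_congr_mem _ _ _ _ ?_
  intro acc j hj
  rw [PySem.List.mem_pyRange_one] at hj
  simp [show i < j by omega]

-- per-phrase: A's scan over all positions equals B's loop over the index hits
lemma pv_phrase_step (words : List String) (tag phrase : String)
    (pw : List String) (hpw : pw ≠ [])
    (tagged : PySem.Dict Int (String × String)) :
    (PySem.List.pyRange 0 ((words.length : Int) - (pw.length : Int) + 1) 1).foldl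
      (fun tagged i =>
        if PySem.List.slice words (some i) (some (i + (pw.length : Int))) = pw ∧
           tagged.contains i = false then
          (PySem.List.pyRange i (i + (pw.length : Int)) 1).foldl
            (fun tagged j =>
              tagged.insert j (if j > i then ((PySem.List.pyGet? words j).getD "", tag)
                               else (phrase, tag)))
            tagged
        else tagged)
      tagged
    = ((PySem.List.pyRange 0 ((words.length : Int) - (pw.length : Int) + 1) 1).filter
        (fun i => PySem.List.slice words (some i) (some (i + (pw.length : Int))) == pw)).foldl
        (fun tagged i =>
          if tagged.contains i = false then
            (PySem.List.pyRange (i + 1) (i + (pw.length : Int)) 1).foldl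
              (fun tagged j => tagged.insert j ((PySem.List.pyGet? words j).getD "", tag))
              (tagged.insert i (phrase, tag))
          else tagged)
        tagged := by
  have hplen : (1 : Int) ≤ (pw.length : Int) := by
    have : pw.length ≠ 0 := by simpa [List.length_eq_zero_iff] using hpw
    omega
  rw [pv_foldl_filter (p := fun i => PySem.List.slice words (some i) (some (i + (pw.length : Int))) = pw)
        (q := fun (t : PySem.Dict Int (String × String)) i => t.contains i = false)]
  have hfil : (fun i => decide (PySem.List.slice words (some i) (some (i + (pw.length : Int))) = pw))
      = (fun i => PySem.List.slice words (some i) (some (i + (pw.length : Int))) == pw) := by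
    funext i
    by_cases h : PySem.List.slice words (some i) (some (i + (pw.length : Int))) = pw <;> simp [h]
  rw [hfil]
  refine PySem.List.foldl_congr_mem _ _ _ _ ?_
  intro acc i _
  by_cases hc : acc.contains i = false
  · simp only [hc, if_true]
    exact pv_inner words tag phrase _ hplen i acc
  · simp [hc]

-- invariant carried through B's fold: every entry of `index` is the honest index
def pvIdxInv (words : List String) (index : PySem.Dict Int (PySem.Dict (List String) (List Int))) : Prop :=
  ∀ n d, index.get? n = some d → d = pvBuildIdx words n

set_option maxHeartbeats 1000000 in
lemma pv_main (words : List String) (tag : String) (ps : List String)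
    (tagged : PySem.Dict Int (String × String))
    (index : PySem.Dict Int (PySem.Dict (List String) (List Int)))
    (hinv : pvIdxInv words index) :
    ps.foldl (pvStepA words tag) tagged = (ps.foldl (pvStepB words tag) (tagged, index)).1 := by
  induction ps generalizing tagged index with
  | nil => rfl
  | cons phrase t ih =>
    simp only [List.foldl_cons]
    by_cases hpw : PySem.Str.split₀ (PySem.Str.lower phrase) = []
    · have hA : pvStepA words tag tagged phrase = tagged := by
        unfold pvStepA
        simp only [hpw, List.length_nil, Nat.cast_zero]
        exact pv_foldl_id _ _ _ (by
          intro s i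
          rw [show i + (0 : Int) = i from by ring, PySem.List.pyRange_one_eq_nil le_rfl]
          simp)
      have hB : pvStepB words tag (tagged, index) phrase = (tagged, index) := by
        unfold pvStepB; simp [hpw]
      rw [hA, hB]; exact ih tagged index hinv
    · -- the updated index and its invariant
      set pw := PySem.Str.split₀ (PySem.Str.lower phrase) with hpwdef
      set plen : Int := (pw.length : Int) with hplendef
      set index' := if index.contains plen then index else index.insert plen (pvBuildIdx words plen)
        with hidx
      have hinv' : pvIdxInv words index' := by
        intro n d h
        rw [hidx] at h
        by_cases hc : index.contains plen = true
        · rw [if_pos hc] at h; exact hinv n d h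
        · rw [if_neg hc, PySem.Dict.get?_insert] at h
          by_cases hn : n = plen
          · rw [if_pos hn] at h; cases h; rw [hn]
          · rw [if_neg hn] at h; exact hinv n d h
      have hlook : index'.getD plen PySem.Dict.empty = pvBuildIdx words plen := by
        rw [hidx]
        by_cases hc : index.contains plen = true
        · rw [if_pos hc]
          rcases (PySem.Dict.contains_eq_isSome_get? index plen ▸ hc : (index.get? plen).isSome = true) with h
          cases hg : index.get? plen with
          | none => rw [hg] at h; simp at h
          | some d => rw [PySem.Dict.getD_eq_get?_getD, hg]; exact hinv plen d hg
        · rw [if_neg hc, PySem.Dict.getD_insert_self]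
      have hB : pvStepB words tag (tagged, index) phrase
          = (pvStepA words tag tagged phrase, index') := by
        unfold pvStepB
        simp only [if_neg hpw, ← hpwdef, ← hplendef, ← hidx, hlook, pvBuildIdx_getD]
        refine Prod.ext ?_ rfl
        unfold pvStepA
        simp only [← hpwdef, ← hplendef]
        exact (pv_phrase_step words tag phrase pw hpw tagged).symm
      rw [hB]
      exact ih _ _ hinv'

-- ===== VERDICT (by name: the statement is the Claim_ definition above) =====
theorem tag_phrases_spec : Claim_equal_tag_phrases := by
  intro words phrase_list tag _
  unfold Spec_tag_phrases tag_phrases tag_phrases_alt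
  exact congrArg PySem.Dict.items
    (pv_main words tag (PySem.List.sorted phrase_list (fun p => PySem.Str.len p) true)
      PySem.Dict.empty PySem.Dict.empty (by intro n d h; simp [PySem.Dict.get?_empty] at h))
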